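-- pv_equiv track=rewrite | github.com/sht3898/algorithm_practice | 집중실습/0904/club_6190_단조증가하는수.py | solve
-- ===== SOURCE A (Python) =====
-- def solve(array):
--     for num in sorted(array, reverse=True):
--         tmp = num
--         for i in range(len(str(num))-1):
--             if str(num)[i] > str(num)[i+1]:
--                 tmp = 0
--                 break
--         if tmp > 0:
--             return num
--     return -1
-- ===== SOURCE B (Python) =====
-- def solve(array):
--     best = -1
--     for num in array:
--         if num > best and num > 0:
--             s = str(num)
--             if all(a <= b for a, b in zip(s, s[1:])):
--                 best = num
--     return best
-- ===== Notes on version B (the rewrite author's own statement) =====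
-- stated objective: faster
-- what changed: B replaces A's sort-descending-then-scan-for-first-valid with a single unsorted pass that keeps the best (largest) positive monotone-digit number seen so far, checking digits pairwise only for candidates that beat the current best.
import Mathlib
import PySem

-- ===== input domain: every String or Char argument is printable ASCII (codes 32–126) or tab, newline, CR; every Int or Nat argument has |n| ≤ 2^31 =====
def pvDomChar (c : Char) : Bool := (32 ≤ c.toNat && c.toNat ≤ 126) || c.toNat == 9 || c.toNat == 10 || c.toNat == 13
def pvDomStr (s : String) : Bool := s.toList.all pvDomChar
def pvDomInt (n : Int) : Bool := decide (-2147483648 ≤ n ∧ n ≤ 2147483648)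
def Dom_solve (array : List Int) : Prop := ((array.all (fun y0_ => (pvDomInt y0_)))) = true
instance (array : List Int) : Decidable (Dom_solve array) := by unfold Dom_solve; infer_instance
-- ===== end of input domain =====

-- B replaces A's sort-descending-then-first-valid scan with one unsorted pass keeping the
-- largest positive monotone-digit number seen so far (objective: faster, no sort).

-- ===== PORT A =====
-- inner 'for i in range(len(str(num))-1): if str(num)[i] > str(num)[i+1]: tmp = 0; break'
-- (string indexing via PySem.List.pyGet? on the char list; indices are always in range,
--  so the 'none' branches are unreachable)
def innerA (s : List Char) (tmp : Int) : List Int → Int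
  | [] => tmp
  | i :: rest =>
    match PySem.List.pyGet? s i, PySem.List.pyGet? s (i + 1) with
    | some a, some b => if a > b then 0 else innerA s tmp rest
    | _, _ => 0

-- outer 'for num in sorted(array, reverse=True): … ; return -1'
def outerA : List Int → Int
  | [] => -1
  | num :: rest =>
    let s := PySem.Int.toChars num
    let tmp := innerA s num (PySem.List.pyRange 0 ((s.length : Int) - 1) 1)
    if tmp > 0 then num else outerA rest

def solve (array : List Int) : Int :=
  outerA (PySem.List.sorted array (fun x => x) true)

-- ===== PORT B =====
-- 'all(a <= b for a, b in zip(s, s[1:]))'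
def monoB : List Char → Bool
  | a :: b :: rest => a ≤ b && monoB (b :: rest)
  | _ => true

-- 'best = -1; for num in array: if num > best and num > 0: … ; return best'
def loopB (best : Int) : List Int → Int
  | [] => best
  | num :: rest =>
    if num > best && num > 0 then
      if monoB (PySem.Int.toChars num) then loopB num rest else loopB best rest
    else loopB best rest

def solve_alt (array : List Int) : Int := loopB (-1) array

-- ===== PRECONDITION & SPEC =====
def Spec_solve (array : List Int) (out : Int) : Prop := out = solve_alt array
instance (array : List Int) (out : Int) : Decidable (Spec_solve array out) := by unfold Spec_solve; infer_instance

-- ===== CLAIM (what is proved, stated in full; the proofs are below) =====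
def Claim_equal_solve : Prop := ∀ (array : List Int), Dom_solve array → Spec_solve array (solve array)

-- ===== LEMMAS AND PROOFS =====

-- "qualifying": positive with non-decreasing digit string
def okB (n : Int) : Bool := decide (0 < n) && monoB (PySem.Int.toChars n)

lemma innerA_shift (c : Char) (s : List Char) (tmp : Int) (n : Nat) :
    ∀ (a b : Int), 0 ≤ a → (b - a).toNat = n →
    innerA (c :: s) tmp (PySem.List.pyRange (a + 1) (b + 1) 1)
      = innerA s tmp (PySem.List.pyRange a b 1) := by
  induction n with
  | zero =>
    intro a b ha hn
    rw [PySem.List.pyRange_one_eq_nil (by omega : b + 1 ≤ a + 1),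
        PySem.List.pyRange_one_eq_nil (by omega : b ≤ a)]
    rfl
  | succ n ih =>
    intro a b ha hn
    have hab : a < b := by omega
    rw [PySem.List.pyRange_one_cons (by omega : a + 1 < b + 1),
        PySem.List.pyRange_one_cons hab]
    have h1 : PySem.List.pyGet? (c :: s) (a + 1) = PySem.List.pyGet? s a := by
      rw [PySem.List.pyGet?_of_nonneg (c :: s) (by omega), PySem.List.pyGet?_of_nonneg s ha]
      have : (a + 1).toNat = a.toNat + 1 := by omega
      simp [this]
    have h2 : PySem.List.pyGet? (c :: s) (a + 1 + 1) = PySem.List.pyGet? s (a + 1) := by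
      rw [PySem.List.pyGet?_of_nonneg (c :: s) (by omega),
          PySem.List.pyGet?_of_nonneg s (by omega : (0:Int) ≤ a + 1)]
      have : (a + 1 + 1).toNat = (a + 1).toNat + 1 := by omega
      simp [this]
    simp only [innerA, h1, h2]
    rcases hx : PySem.List.pyGet? s a with _ | x
    · rfl
    rcases hy : PySem.List.pyGet? s (a + 1) with _ | y
    · rfl
    by_cases hxy : x > y
    · simp [hxy]
    · simp only [hxy, if_false]
      have := ih (a + 1) b (by omega) (by omega)
      simpa using this

lemma innerA_eq_monoB (s : List Char) (tmp : Int) :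
    innerA s tmp (PySem.List.pyRange 0 ((s.length : Int) - 1) 1)
      = if monoB s then tmp else 0 := by
  induction s with
  | nil => rw [PySem.List.pyRange_one_eq_nil (by simp)]; rfl
  | cons a t ih =>
    cases t with
    | nil => rw [PySem.List.pyRange_one_eq_nil (by simp)]; rfl
    | cons b u =>
      have hlen : ((a :: b :: u).length : Int) - 1 = (u.length : Int) + 1 := by
        simp
      rw [hlen, PySem.List.pyRange_one_cons (by omega : (0:Int) < (u.length : Int) + 1)]
      have h0 : PySem.List.pyGet? (a :: b :: u) 0 = some a :=
        PySem.List.pyGet?_zero_cons a (b :: u)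
      have h1 : PySem.List.pyGet? (a :: b :: u) (0 + 1) = some b := by
        rw [PySem.List.pyGet?_of_nonneg _ (by omega)]; rfl
      simp only [innerA, h0, h1]
      by_cases hab : a > b
      · have : ¬ (a ≤ b) := not_le.mpr hab
        simp [hab, monoB, this]
      · simp only [hab, if_false]
        have hs : innerA (a :: b :: u) tmp (PySem.List.pyRange (0 + 1) ((u.length : Int) + 1) 1)
            = innerA (b :: u) tmp (PySem.List.pyRange 0 (u.length : Int) 1) :=
          innerA_shift a (b :: u) tmp (u.length) 0 (u.length : Int) le_rfl (by omega)
        have hlen2 : ((b :: u).length : Int) - 1 = (u.length : Int) := by simp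
        rw [hs]
        rw [hlen2] at ih
        rw [ih]
        have : a ≤ b := not_lt.mp hab
        simp [monoB, this]

lemma outerA_cons (num : Int) (rest : List Int) :
    outerA (num :: rest) = if okB num then num else outerA rest := by
  simp only [outerA, innerA_eq_monoB, okB]
  by_cases hm : monoB (PySem.Int.toChars num)
  · by_cases hp : 0 < num <;> simp [hm, hp]
  · simp [hm]

lemma loopB_eq_foldl (xs : List Int) : ∀ best : Int,
    loopB best xs = (xs.filter okB).foldl max best := by
  induction xs with
  | nil => intro best; rfl
  | cons num rest ih =>
    intro best
    by_cases hp : 0 < num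
    · by_cases hm : monoB (PySem.Int.toChars num) = true
      · have hok : okB num = true := by simp [okB, hp, hm]
        by_cases hb : num > best
        · have hmax : max best num = num := by omega
          simp [loopB, hb, hp, hm, hok, ih, hmax]
        · have hmax : max best num = best := by omega
          have hcond : (decide (num > best) && decide (num > 0)) = false := by
            simp; intro h; omega
          simp [loopB, hcond, hok, ih, hmax]
      · have hok : okB num = false := by simp [okB, hm]
        by_cases hb : num > best
        · simp [loopB, hb, hp, hm, hok, ih]
        · have hcond : (decide (num > best) && decide (num > 0)) = false := by
            simp; intro h; omega
          simp [loopB, hcond, hok, ih]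
    · have hok : okB num = false := by simp [okB]; intro h; omega
      have hcond : (decide (num > best) && decide (num > 0)) = false := by
        simp; intro _; omega
      simp [loopB, hcond, hok, ih]

lemma foldl_max_of_le (l : List Int) : ∀ b : Int, (∀ x ∈ l, x ≤ b) → l.foldl max b = b := by
  induction l with
  | nil => intro b _; rfl
  | cons y t ih =>
    intro b h
    have hy : y ≤ b := h y (by simp)
    have : max b y = b := by omega
    simp only [List.foldl_cons, this]
    exact ih b (fun x hx => h x (by simp [hx]))

lemma outerA_desc (t : List Int) (hsort : t.Pairwise (fun a b => a ≥ b)) :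
    outerA t = (t.filter okB).foldl max (-1) := by
  induction t with
  | nil => rfl
  | cons a rest ih =>
    rcases List.pairwise_cons.mp hsort with ⟨hge, htail⟩
    rw [outerA_cons]
    by_cases hok : okB a = true
    · have ha : 0 < a := by
        have := hok; simp [okB] at this; exact this.1
      simp only [if_true, List.filter_cons, hok, List.foldl_cons]
      have hmax : max (-1 : Int) a = a := by omega
      rw [hmax]
      refine (foldl_max_of_le _ a ?_).symm
      intro x hx
      exact hge x (List.mem_of_mem_filter hx)
    · rw [Bool.not_eq_true] at hok
      simp only [hok, Bool.false_eq_true, if_false, List.filter_cons]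
      exact ih htail

lemma foldl_max_perm {l₁ l₂ : List Int} (h : l₁.Perm l₂) (b : Int) :
    l₁.foldl max b = l₂.foldl max b := by
  induction h generalizing b with
  | nil => rfl
  | cons x _ ih => simp only [List.foldl_cons]; exact ih _
  | swap x y l =>
    simp only [List.foldl_cons]
    have : max (max b y) x = max (max b x) y := by omega
    rw [this]
  | trans _ _ ih₁ ih₂ => exact (ih₁ b).trans (ih₂ b)

-- ===== VERDICT (by name: the statement is the Claim_ definition above) =====
theorem solve_spec : Claim_equal_solve := by
  intro array _
  unfold Spec_solve solve solve_alt
  set t := PySem.List.sorted array (fun x => x) true with ht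
  have hperm : t.Perm array := PySem.List.sorted_perm array (fun x => x) true
  have hpw : t.Pairwise (fun a b => a ≥ b) := by
    have := PySem.List.sorted_pairwise_rev array (fun x => x)
    exact this.imp (fun h => h)
  rw [outerA_desc t hpw, loopB_eq_foldl]
  exact foldl_max_perm (hperm.filter okB) (-1)
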